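-- pv_equiv track=rewrite | github.com/JIE77777/Wagstaff-Lab | core/lua/scan.py | strip_lua_comments
-- ===== SOURCE A (Python) =====
-- from typing import List, Optional
--
-- def _long_bracket_level(text: str, i: int) -> Optional[int]:
--     """
--     If text[i:] starts a Lua long-bracket opener: [=*[ , return '=' count; else None.
--     Examples: [[ -> 0, [=[ -> 1, [==[ -> 2
--     """
--     n = len(text)
--     if i >= n or text[i] != "[":
--         return None
--     j = i + 1
--     while j < n and text[j] == "=":
--         j += 1
--     if j < n and text[j] == "[":
--         return j - i - 1
--     return None
--
-- def _skip_long_bracket(text: str, i: int, level: int) -> int: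
--     """Skip Lua long-bracket string/comment starting at i. Return next index."""
--     n = len(text)
--     opener_len = 2 + level
--     start = i + opener_len
--     close_pat = "]" + ("=" * level) + "]"
--     end = text.find(close_pat, start)
--     if end == -1:
--         return n
--     return end + len(close_pat)
--
-- def _skip_short_string(text: str, i: int, quote: str) -> int:
--     """Skip '...' or "...", supporting backslash escapes. Return next index."""
--     n = len(text)
--     i += 1
--     while i < n:
--         ch = text[i]
--         if ch == "\\":
--             i += 2
--             continue
--         if ch == quote:
--             return i + 1
--         i += 1
--     return n
--
-- def _skip_comment(text: str, i: int) -> int: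
--     """i points at '-' and text[i:i+2]=='--'. Skip a line or block comment. Return next index."""
--     n = len(text)
--     if not text.startswith("--", i):
--         return i
--
--     # Block comment: --[=*[ ... ]=*]
--     if i + 2 < n and text[i + 2] == "[":
--         level = _long_bracket_level(text, i + 2)
--         if level is not None:
--             return _skip_long_bracket(text, i + 2, level)
--
--     # Line comment
--     nl = text.find("\n", i + 2)
--     return n if nl == -1 else nl + 1
--
-- def _skip_string_or_long_string(text: str, i: int) -> Optional[int]:
--     """If position i starts a string/long-string, return next index; else None."""
--     if i >= len(text):
--         return None
--     ch = text[i]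
--     if ch in ("'", '"'):
--         return _skip_short_string(text, i, ch)
--     if ch == "[":
--         level = _long_bracket_level(text, i)
--         if level is not None:
--             return _skip_long_bracket(text, i, level)
--     return None
--
-- def strip_lua_comments(text: str) -> str:
--     """
--     Remove Lua comments while preserving line breaks (keeps line numbers stable).
--     Strings/long-strings are preserved.
--     """
--     if not text:
--         return ""
--     n = len(text)
--     out: List[str] = []
--     i = 0
--     while i < n:
--         if text.startswith("--", i):
--             j = _skip_comment(text, i)
--             out.append("\n" * text[i:j].count("\n"))
--             i = j
--             continue
--         nxt = _skip_string_or_long_string(text, i)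
--         if nxt is not None:
--             out.append(text[i:nxt])
--             i = nxt
--             continue
--         out.append(text[i])
--         i += 1
--     return "".join(out)
-- ===== SOURCE B (Python) =====
-- def _opener_level(text, i):
--     # lookahead: [=*[ starting at i -> number of '='s, else None
--     if i < len(text) and text[i] == '[':
--         j = i + 1
--         while j < len(text) and text[j] == '=':
--             j += 1
--         if j < len(text) and text[j] == '[':
--             return j - i - 1
--     return None
--
-- def strip_lua_comments(text: str) -> str:
--     out = []
--     n = len(text)
--     i = 0
--     state = 'code'
--     quote = ''
--     esc = False
--     level = 0
--     while i < n:
--         c = text[i]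
--         if state == 'code':
--             if text.startswith('--', i):
--                 lv = _opener_level(text, i + 2)
--                 if lv is not None:
--                     state = 'block'; level = lv; i += 4 + lv
--                 else:
--                     state = 'line'; i += 2
--             elif c == "'" or c == '"':
--                 out.append(c); state = 'short'; quote = c; esc = False; i += 1
--             else:
--                 lv = _opener_level(text, i)
--                 if lv is not None:
--                     out.append(text[i:i + 2 + lv]); state = 'long'; level = lv; i += 2 + lv
--                 else:
--                     out.append(c); i += 1
--         elif state == 'short':
--             out.append(c)
--             if esc:
--                 esc = False
--             elif c == '\\':
--                 esc = True
--             elif c == quote: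
--                 state = 'code'
--             i += 1
--         elif state == 'long':
--             if c == ']' and text.startswith('=' * level + ']', i + 1):
--                 out.append(text[i:i + level + 2]); state = 'code'; i += level + 2
--             else:
--                 out.append(c); i += 1
--         elif state == 'line':
--             if c == '\n':
--                 out.append('\n'); state = 'code'
--             i += 1
--         else:  # block
--             if c == ']' and text.startswith('=' * level + ']', i + 1):
--                 state = 'code'; i += level + 2
--             else:
--                 if c == '\n':
--                     out.append('\n')
--                 i += 1
--     return ''.join(out)
-- ===== Notes on version B (the rewrite author's own statement) =====
-- stated objective: alternative
-- what changed: Replaced A's helper-based bulk skipping (find-based jumps over comments/strings, slice appends) by one flat character loop with an explicit mode state machine (code / short string with escape flag / long-bracket string / line comment / block comment) that consumes and emits characters one at a time.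
import Mathlib
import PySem

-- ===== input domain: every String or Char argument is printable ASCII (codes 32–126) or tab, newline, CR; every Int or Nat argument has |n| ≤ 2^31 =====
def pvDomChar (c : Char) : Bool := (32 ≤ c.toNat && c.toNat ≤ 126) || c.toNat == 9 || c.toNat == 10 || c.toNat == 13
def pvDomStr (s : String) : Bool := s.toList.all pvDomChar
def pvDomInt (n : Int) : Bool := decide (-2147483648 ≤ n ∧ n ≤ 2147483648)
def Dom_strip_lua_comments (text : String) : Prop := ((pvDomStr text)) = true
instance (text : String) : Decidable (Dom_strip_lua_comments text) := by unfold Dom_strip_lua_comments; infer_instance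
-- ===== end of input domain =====

-- B replaces A's helper/find-based bulk skipping by one flat per-character state machine; same output (alternative decomposition, no speed claim).

-- ===== PORT A =====
-- A is ported over List Char: the position text[i:] is represented by the suffix
-- list, and each skip helper returns (consumed chunk, remaining suffix).

-- inner while of _long_bracket_level
def lbAuxA : List Char → Nat → Option Nat
  | '=' :: rest, k => lbAuxA rest (k + 1)
  | '[' :: _, k => some k
  | _, _ => none

-- _long_bracket_level
def lbLevelA : List Char → Option Nat
  | '[' :: rest => lbAuxA rest 0
  | _ => none

-- text.find(pat, start): first-occurrence scan; consumed includes pat; not found => consume all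
def findConsumeA (pat : List Char) : List Char → List Char × List Char
  | [] => ([], [])
  | c :: rest =>
    if pat.isPrefixOf (c :: rest) then (pat, (c :: rest).drop pat.length)
    else
      let p := findConsumeA pat rest
      (c :: p.1, p.2)

def closePatA (level : Nat) : List Char := ']' :: (List.replicate level '=' ++ [']'])

-- _skip_long_bracket
def skipLongA (l : List Char) (level : Nat) : List Char × List Char :=
  let opener := l.take (2 + level)
  let p := findConsumeA (closePatA level) (l.drop (2 + level))
  (opener ++ p.1, p.2)

-- while loop of _skip_short_string (after the opening quote)
def skipShortAuxA : List Char → Char → List Char × List Char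
  | [], _ => ([], [])
  | '\\' :: rest, q =>
    match rest with
    | [] => (['\\'], [])
    | c :: rest' =>
      let p := skipShortAuxA rest' q
      ('\\' :: c :: p.1, p.2)
  | c :: rest, q =>
    if c = q then ([c], rest)
    else
      let p := skipShortAuxA rest q
      (c :: p.1, p.2)

-- text.find("\n", i+2) of _skip_comment
def lineAuxA : List Char → List Char × List Char
  | [] => ([], [])
  | '\n' :: rest => (['\n'], rest)
  | c :: rest =>
    let p := lineAuxA rest
    (c :: p.1, p.2)

-- _skip_comment (position l starts with "--" when called from the main loop)
def skipCommentA (l : List Char) : List Char × List Char :=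
  if l.take 2 = ['-', '-'] then
    match lbLevelA (l.drop 2) with
    | some lv =>
      let p := skipLongA (l.drop 2) lv
      ('-' :: '-' :: p.1, p.2)
    | none =>
      let p := lineAuxA (l.drop 2)
      ('-' :: '-' :: p.1, p.2)
  else ([], l)

-- _skip_string_or_long_string
def skipStringOrLongA (l : List Char) : Option (List Char × List Char) :=
  match l with
  | [] => none
  | c :: rest =>
    if c = '\'' ∨ c = '"' then
      let p := skipShortAuxA rest c
      some (c :: p.1, p.2)
    else if c = '[' then
      match lbLevelA (c :: rest) with
      | some lv => some (skipLongA (c :: rest) lv)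
      | none => none
    else none

-- length facts the main-loop recursion of the port needs (cited in decreasing_by)
theorem findConsumeA_append (pat : List Char) : ∀ l : List Char, (findConsumeA pat l).1 ++ (findConsumeA pat l).2 = l := by
  intro l
  induction l with
  | nil => simp [findConsumeA]
  | cons c rest ih =>
    simp only [findConsumeA]
    split
    · rename_i h
      have h' := List.isPrefixOf_iff_prefix.mp h
      obtain ⟨t, ht⟩ := h'
      simp [← ht]
    · simpa using ih

theorem skipShortAuxA_append : ∀ (l : List Char) (q : Char), (skipShortAuxA l q).1 ++ (skipShortAuxA l q).2 = l := by
  intro l q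
  fun_induction skipShortAuxA l q <;> simp_all <;> assumption

theorem lineAuxA_append : ∀ l : List Char, (lineAuxA l).1 ++ (lineAuxA l).2 = l := by
  intro l
  fun_induction lineAuxA l <;> simp_all <;> assumption

theorem skipLongA_append (l : List Char) (lv : Nat) : (skipLongA l lv).1 ++ (skipLongA l lv).2 = l := by
  simp [skipLongA, List.append_assoc, findConsumeA_append]

theorem skipCommentA_len (c : Char) (rest : List Char) (h : (c :: rest).take 2 = ['-', '-']) :
    (skipCommentA (c :: rest)).2.length < (c :: rest).length := by
  simp only [skipCommentA, if_pos h]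
  split
  · rename_i lv _
    have := congrArg List.length (skipLongA_append ((c :: rest).drop 2) lv)
    simp at this ⊢
    omega
  · have := congrArg List.length (lineAuxA_append ((c :: rest).drop 2))
    simp at this ⊢
    omega

theorem skipStringOrLongA_len (c : Char) (rest : List Char) (p : List Char × List Char)
    (h : skipStringOrLongA (c :: rest) = some p) : p.2.length < (c :: rest).length := by
  simp only [skipStringOrLongA] at h
  split at h
  · have hap := congrArg List.length (skipShortAuxA_append rest c)
    simp at hap
    cases h
    simp
    omega
  · split at h
    · split at h
      · rename_i lv _
        cases h
        have := congrArg List.length (skipLongA_append (c :: rest) lv)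
        have h2 := congrArg List.length (findConsumeA_append (closePatA lv) ((c :: rest).drop (2 + lv)))
        simp [skipLongA] at this ⊢
        simp at h2
        omega
      · cases h
    · cases h

-- main while loop of strip_lua_comments
def goA : List Char → List Char
  | [] => []
  | c :: rest =>
    if h2 : (c :: rest).take 2 = ['-', '-'] then
      let p := skipCommentA (c :: rest)
      List.replicate (p.1.count '\n') '\n' ++ goA p.2
    else
      match h3 : skipStringOrLongA (c :: rest) with
      | some p => p.1 ++ goA p.2
      | none => c :: goA rest
termination_by l => l.length
decreasing_by
  · exact skipCommentA_len c rest h2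
  · exact skipStringOrLongA_len c rest p h3
  · simp

def strip_lua_comments (text : String) : String := String.mk (goA text.toList)

-- ===== PORT B =====
-- B: one flat loop over the characters with an explicit mode state.

inductive LModeB : Type
  | code : LModeB
  | short : Char → Bool → LModeB      -- quote char, escape-pending flag
  | long : Nat → LModeB               -- long-bracket string, '=' level
  | line : LModeB                     -- line comment
  | block : Nat → LModeB              -- block comment, '=' level
deriving DecidableEq, Repr

-- _opener_level lookahead: [=*[ at the head -> '=' count
def openerAuxB : List Char → Nat → Option Nat
  | '=' :: rest, k => openerAuxB rest (k + 1)
  | '[' :: _, k => some k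
  | _, _ => none

def openerLevelB : List Char → Option Nat
  | '[' :: rest => openerAuxB rest 0
  | _ => none

def goB : LModeB → List Char → List Char
  | _, [] => []
  | .code, c :: rest =>
    if (c :: rest).take 2 = ['-', '-'] then
      match openerLevelB ((c :: rest).drop 2) with
      | some lv => goB (.block lv) ((c :: rest).drop (4 + lv))
      | none => goB .line ((c :: rest).drop 2)
    else if c = '\'' ∨ c = '"' then
      c :: goB (.short c false) rest
    else
      match openerLevelB (c :: rest) with
      | some lv => (c :: rest).take (2 + lv) ++ goB (.long lv) ((c :: rest).drop (2 + lv))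
      | none => c :: goB .code rest
  | .short q esc, c :: rest =>
    c ::
      (if esc then goB (.short q false) rest
       else if c = '\\' then goB (.short q true) rest
       else if c = q then goB .code rest
       else goB (.short q false) rest)
  | .long lv, c :: rest =>
    if c = ']' ∧ (List.replicate lv '=' ++ [']']).isPrefixOf rest then
      (c :: rest).take (lv + 2) ++ goB .code (rest.drop (lv + 1))
    else c :: goB (.long lv) rest
  | .line, c :: rest =>
    if c = '\n' then '\n' :: goB .code rest else goB .line rest
  | .block lv, c :: rest =>
    if c = ']' ∧ (List.replicate lv '=' ++ [']']).isPrefixOf rest then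
      goB .code (rest.drop (lv + 1))
    else if c = '\n' then '\n' :: goB (.block lv) rest
    else goB (.block lv) rest
termination_by _ l => l.length
decreasing_by all_goals simp <;> omega

def strip_lua_comments_alt (text : String) : String := String.mk (goB .code text.toList)

-- ===== PRECONDITION & SPEC =====
def Spec_strip_lua_comments (text : String) (out : String) : Prop := out = strip_lua_comments_alt text
instance (text : String) (out : String) : Decidable (Spec_strip_lua_comments text out) := by unfold Spec_strip_lua_comments; infer_instance

-- ===== CLAIM (what is proved, stated in full; the proofs are below) =====
def Claim_equal_strip_lua_comments : Prop := ∀ (text : String), Dom_strip_lua_comments text → Spec_strip_lua_comments text (strip_lua_comments text)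

-- ===== LEMMAS AND PROOFS =====
theorem goB_short (l : List Char) (q : Char) :
    goB (.short q false) l = (skipShortAuxA l q).1 ++ goB .code ((skipShortAuxA l q).2) := by
  fun_induction skipShortAuxA l q <;> simp_all [goB] <;> rfl

theorem openerAuxB_eq : ∀ (l : List Char) (k : Nat), openerAuxB l k = lbAuxA l k := by
  intro l k
  fun_induction openerAuxB l k <;> simp_all [lbAuxA]

theorem openerLevelB_eq (l : List Char) : openerLevelB l = lbLevelA l := by
  rw [openerLevelB.eq_def, lbLevelA.eq_def]
  split <;> simp_all [openerAuxB_eq]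

theorem lbAuxA_some (l : List Char) (k lv : Nat) (h : lbAuxA l k = some lv) :
    k ≤ lv ∧ ∃ r, l = List.replicate (lv - k) '=' ++ '[' :: r := by
  revert h
  fun_induction lbAuxA l k with
  | case1 rest k ih =>
    intro h
    obtain ⟨hk, r, hr⟩ := ih h
    refine ⟨by omega, r, ?_⟩
    have hlv : lv - k = (lv - (k + 1)) + 1 := by omega
    rw [hlv, List.replicate_succ, hr]
    simp
  | case2 rest k =>
    intro h
    simp only [Option.some.injEq] at h
    subst h
    exact ⟨le_refl _, rest, by simp⟩
  | case3 => intro h; simp at h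

theorem lbLevelA_some (l : List Char) (lv : Nat) (h : lbLevelA l = some lv) :
    ∃ r, l = '[' :: (List.replicate lv '=' ++ '[' :: r) := by
  match l with
  | [] => simp [lbLevelA] at h
  | c :: rest =>
    by_cases hc : c = '['
    · subst hc
      simp only [lbLevelA] at h
      obtain ⟨-, r, hr⟩ := lbAuxA_some rest 0 lv h
      exact ⟨r, by simp [hr]⟩
    · exfalso
      rw [lbLevelA.eq_def] at h
      split at h <;> simp_all

theorem lbLevelA_cons_ne (c : Char) (rest : List Char) (h : c ≠ '[') :
    lbLevelA (c :: rest) = none := by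
  rw [lbLevelA.eq_def]
  split <;> simp_all
theorem closer_cond (lv : Nat) (c : Char) (rest : List Char) :
    (c = ']' ∧ (List.replicate lv '=' ++ [']']).isPrefixOf rest) ↔
      (closePatA lv).isPrefixOf (c :: rest) := by
  unfold closePatA
  rw [List.isPrefixOf_iff_prefix, List.isPrefixOf_iff_prefix, List.cons_prefix_cons]
  constructor <;> rintro ⟨h1, h2⟩ <;> exact ⟨h1.symm, h2⟩

theorem closePatA_length (lv : Nat) : (closePatA lv).length = lv + 2 := by
  unfold closePatA
  rw [List.length_cons, List.length_append, List.length_replicate]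
  simp

theorem goB_long (lv : Nat) (l : List Char) :
    goB (.long lv) l =
      (findConsumeA (closePatA lv) l).1 ++ goB .code ((findConsumeA (closePatA lv) l).2) := by
  induction l with
  | nil => simp [goB, findConsumeA]
  | cons c rest ih =>
    by_cases h : (closePatA lv).isPrefixOf (c :: rest)
    · have hc : c = ']' ∧ (List.replicate lv '=' ++ [']']).isPrefixOf rest :=
        (closer_cond lv c rest).mpr h
      obtain ⟨t, ht⟩ := List.isPrefixOf_iff_prefix.mp h
      have htk : (c :: rest).take (lv + 2) = closePatA lv := by
        rw [← ht, List.take_left' (closePatA_length lv)]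
      have hdr : rest.drop (lv + 1) = (c :: rest).drop ((closePatA lv).length) := by
        rw [closePatA_length]
        rfl
      simp only [findConsumeA, if_pos h, goB, if_pos hc]
      rw [htk, hdr]
    · have hc : ¬(c = ']' ∧ (List.replicate lv '=' ++ [']']).isPrefixOf rest) := by
        rw [closer_cond]; exact h
      simp only [findConsumeA, if_neg h, goB, if_neg hc]
      simp [ih]

theorem count_closePatA (lv : Nat) : (closePatA lv).count '\n' = 0 := by
  simp [closePatA, List.count_cons, List.count_append, List.count_replicate]

theorem goB_block (lv : Nat) (l : List Char) :
    goB (.block lv) l =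
      List.replicate ((findConsumeA (closePatA lv) l).1.count '\n') '\n' ++
        goB .code ((findConsumeA (closePatA lv) l).2) := by
  induction l with
  | nil => simp [goB, findConsumeA]
  | cons c rest ih =>
    by_cases h : (closePatA lv).isPrefixOf (c :: rest)
    · have hc : c = ']' ∧ (List.replicate lv '=' ++ [']']).isPrefixOf rest :=
        (closer_cond lv c rest).mpr h
      have hdr : rest.drop (lv + 1) = (c :: rest).drop ((closePatA lv).length) := by
        rw [closePatA_length]
        rfl
      simp only [findConsumeA, if_pos h, goB, if_pos hc]
      rw [hdr, count_closePatA]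
      simp
    · have hc : ¬(c = ']' ∧ (List.replicate lv '=' ++ [']']).isPrefixOf rest) := by
        rw [closer_cond]; exact h
      simp only [findConsumeA, if_neg h, goB, if_neg hc]
      by_cases hn : c = '\n'
      · subst hn
        simp [ih, List.count_cons, List.replicate_succ]
      · simp [ih, hn, List.count_cons]

theorem goB_line (l : List Char) :
    goB .line l =
      List.replicate ((lineAuxA l).1.count '\n') '\n' ++ goB .code ((lineAuxA l).2) := by
  fun_induction lineAuxA l <;> simp_all [goB, List.count_cons] <;> rfl
theorem take_opener (lv : Nat) (r : List Char) :
    ('[' :: (List.replicate lv '=' ++ '[' :: r)).take (2 + lv) = '[' :: (List.replicate lv '=' ++ ['[']) := by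
  have h1 : List.replicate lv '=' ++ '[' :: r = (List.replicate lv '=' ++ ['[']) ++ r := by simp
  rw [h1, show 2 + lv = (1 + lv) + 1 from by omega, List.take_succ_cons]
  congr 1
  exact List.take_left' (by simp; omega)

theorem drop_opener (lv : Nat) (r : List Char) :
    ('[' :: (List.replicate lv '=' ++ '[' :: r)).drop (2 + lv) = r := by
  have h1 : List.replicate lv '=' ++ '[' :: r = (List.replicate lv '=' ++ ['[']) ++ r := by simp
  rw [h1, show 2 + lv = (1 + lv) + 1 from by omega, List.drop_succ_cons]
  exact List.drop_left' (by simp; omega)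

theorem goA_goB_code : ∀ l : List Char, goA l = goB .code l := by
  intro l
  fun_induction goA l with
  | case1 => simp [goB]
  | case2 c rest h2 p ih =>
    obtain ⟨hc, rest2, hrest⟩ : c = '-' ∧ ∃ rest2, rest = '-' :: rest2 := by
      cases rest with
      | nil => simp at h2
      | cons d rest2 =>
        simp [List.take] at h2
        exact ⟨h2.1, rest2, by simp [h2.2]⟩
    subst hc hrest
    have ih2 : goA (skipCommentA ('-' :: '-' :: rest2)).2 =
        goB .code (skipCommentA ('-' :: '-' :: rest2)).2 := ih
    simp only [goB, if_pos h2, openerLevelB_eq]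
    show List.replicate ((skipCommentA ('-' :: '-' :: rest2)).1.count '\n') '\n' ++
        goA (skipCommentA ('-' :: '-' :: rest2)).2 = _
    cases hlv : lbLevelA rest2 with
    | none =>
      simp only [skipCommentA, if_pos h2, List.drop, hlv] at ih2 ⊢
      rw [goB_line]
      simp only [List.count_cons]
      simp [ih2]
    | some lv =>
      obtain ⟨r, hr⟩ := lbLevelA_some rest2 lv hlv
      simp only [skipCommentA, if_pos h2, List.drop, hlv, skipLongA] at ih2 ⊢
      have htk : rest2.take (2 + lv) = '[' :: (List.replicate lv '=' ++ ['[']) := by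
        rw [hr]; exact take_opener lv r
      have hdr : rest2.drop (2 + lv) = r := by
        rw [hr]; exact drop_opener lv r
      have hdr4 : ('-' :: '-' :: rest2).drop (4 + lv) = r := by
        rw [hr, show 4 + lv = ((2 + lv) + 1) + 1 from by omega]
        rw [List.drop_succ_cons, List.drop_succ_cons]
        exact drop_opener lv r
      rw [hdr4, goB_block, htk, hdr]
      rw [hdr] at ih2
      simp [List.count_cons, List.count_append, List.count_replicate, ih2]
  | case3 c rest h2 p h3 ih =>
    simp only [skipStringOrLongA] at h3
    split at h3
    · rename_i hq
      simp only [Option.some.injEq] at h3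
      subst h3
      simp only [goB, if_neg h2, if_pos hq]
      rw [goB_short]
      simp [ih]
    · split at h3
      · rename_i hnq hb
        split at h3
        · rename_i lv hlv
          simp only [Option.some.injEq] at h3
          subst h3
          subst hb
          simp only [skipLongA] at ih ⊢
          simp only [goB, if_neg h2, if_neg hnq, openerLevelB_eq, hlv]
          rw [goB_long]
          simp [ih]
        · cases h3
      · cases h3
  | case4 c rest h2 h3 ih =>
    have hnone : lbLevelA (c :: rest) = none := by
      by_cases hb : c = '['
      · subst hb
        simp only [skipStringOrLongA] at h3
        split at h3
        · cases h3
        · split at h3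
          · split at h3
            · cases h3
            · assumption
          · simp at *
      · exact lbLevelA_cons_ne c rest hb
    have hnq : ¬(c = '\'' ∨ c = '"') := by
      intro hq
      simp only [skipStringOrLongA, if_pos hq] at h3
      cases h3
    simp only [goB, if_neg h2, if_neg hnq, openerLevelB_eq, hnone]
    simp [ih]

-- ===== VERDICT (by name: the statement is the Claim_ definition above) =====
theorem strip_lua_comments_spec : Claim_equal_strip_lua_comments := by
  intro text _
  unfold Spec_strip_lua_comments strip_lua_comments strip_lua_comments_alt
  rw [goA_goB_code]
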